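-- pv_equiv track=rewrite | github.com/virajd98/Tutorial_SCI2025-Hybrid_QLS_for_CFD | vqls_prototype/matrix_decomposition/optimized_matrix_decomposition.py | _get_commuting_strings
-- ===== SOURCE A (Python) =====
-- import itertools
--
-- def _get_commuting_strings(pauli_string):
--     """Returns all the strings that commute with string
--
--     Args:
--         string (_type_): _description_
--     """
--     all_gates = ["I", "X", "Y", "Z"]
--     basis = []
--     for p in pauli_string:
--         if p == "I":
--             basis.append(all_gates)
--         if p != "I":
--             basis.append(["I", p])
--     return ["".join(s) for s in itertools.product(*basis)]
-- ===== SOURCE B (Python) =====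
-- def _get_commuting_strings(pauli_string):
--     """Mixed-radix index decoding: count the results, then decode each index
--     i in range(total) into its gate string digit by digit (right-to-left),
--     instead of expanding a Cartesian product."""
--     all_gates = ["I", "X", "Y", "Z"]
--     choices = [all_gates if p == "I" else ["I", p] for p in pauli_string]
--     total = 1
--     for c in choices:
--         total *= len(c)
--     out = []
--     for i in range(total):
--         rem = i
--         chars = []
--         for c in reversed(choices):
--             rem, d = divmod(rem, len(c))
--             chars.append(c[d])
--         out.append("".join(reversed(chars)))
--     return out
-- ===== Notes on version B (the rewrite author's own statement) =====
-- stated objective: alternative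
-- what changed: Replaces the build-basis-then-itertools.product expansion by mixed-radix index decoding: compute the total count of results, then for each index in range(total) decode its digits right-to-left with divmod to pick one gate per position.
import Mathlib
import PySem

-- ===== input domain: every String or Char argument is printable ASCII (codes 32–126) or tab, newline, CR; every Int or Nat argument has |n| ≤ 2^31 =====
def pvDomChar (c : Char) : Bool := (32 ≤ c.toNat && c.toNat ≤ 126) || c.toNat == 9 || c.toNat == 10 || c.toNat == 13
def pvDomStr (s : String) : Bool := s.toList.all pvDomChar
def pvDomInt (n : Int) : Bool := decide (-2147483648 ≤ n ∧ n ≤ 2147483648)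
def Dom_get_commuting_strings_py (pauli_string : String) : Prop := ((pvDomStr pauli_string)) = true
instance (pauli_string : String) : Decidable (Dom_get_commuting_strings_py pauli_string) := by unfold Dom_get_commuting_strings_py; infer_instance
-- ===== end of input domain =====

-- B replaces the build-basis + itertools.product expansion by mixed-radix index decoding
-- (count the results, then decode each index into its gate string); objective: alternative.

-- ===== PORT A =====
def pvAllGates : List String := ["I", "X", "Y", "Z"]

-- the for-loop building `basis` (two independent ifs, as in A)
def pvBuildBasis (cs : List Char) : List (List String) :=
  cs.foldl (fun basis p =>
    let basis := if p = 'I' then basis ++ [pvAllGates] else basis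
    let basis := if p ≠ 'I' then basis ++ [["I", String.ofList [p]]] else basis
    basis) []

-- itertools.product over a list of pools (leftmost varies slowest)
def pvProduct (pools : List (List String)) : List (List String) :=
  match pools with
  | [] => [[]]
  | l :: ls => l.flatMap (fun x => (pvProduct ls).map (fun s => x :: s))

def get_commuting_strings_py (pauli_string : String) : List String :=
  (pvProduct (pvBuildBasis pauli_string.toList)).map String.join

-- ===== PORT B =====
-- per-position pool, the comprehension body of Source B
def pvChoices (p : Char) : List String :=
  if p = 'I' then pvAllGates else ["I", String.ofList [p]]

-- `range(total)` over a nonnegative count and `divmod` on nonnegative ints are ported with Nat;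
-- Python's append-then-final-reverse of `chars` is ported as prepending (same resulting list).
def get_commuting_strings_py_alt (pauli_string : String) : List String :=
  let choices := pauli_string.toList.map pvChoices
  let total := choices.foldl (fun t c => t * c.length) 1
  (List.range total).map (fun i =>
    let st := choices.reverse.foldl
      (fun (st : Nat × List String) c =>
        (st.1 / c.length, c.getD (st.1 % c.length) "" :: st.2))
      (i, [])
    String.join st.2)

-- ===== PRECONDITION & SPEC =====
def Spec_get_commuting_strings_py (pauli_string : String) (out : List String) : Prop := out = get_commuting_strings_py_alt pauli_string
instance (pauli_string : String) (out : List String) : Decidable (Spec_get_commuting_strings_py pauli_string out) := by unfold Spec_get_commuting_strings_py; infer_instance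

-- ===== CLAIM (what is proved, stated in full; the proofs are below) =====
def Claim_equal_get_commuting_strings_py : Prop := ∀ (pauli_string : String), Dom_get_commuting_strings_py pauli_string → Spec_get_commuting_strings_py pauli_string (get_commuting_strings_py pauli_string)

-- ===== LEMMAS AND PROOFS =====

-- A's basis-building loop produces the per-position pools
lemma pvBuildBasis_acc (cs : List Char) (acc : List (List String)) :
    cs.foldl (fun basis p =>
      let basis := if p = 'I' then basis ++ [pvAllGates] else basis
      let basis := if p ≠ 'I' then basis ++ [["I", String.ofList [p]]] else basis
      basis) acc = acc ++ cs.map pvChoices := by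
  induction cs generalizing acc with
  | nil => simp
  | cons c cs ih =>
    simp only [List.foldl_cons, List.map_cons, ih]
    by_cases h : c = 'I' <;> simp [h, pvChoices]

lemma pvBuildBasis_eq (cs : List Char) : pvBuildBasis cs = cs.map pvChoices := by
  exact (pvBuildBasis_acc cs []).trans (by simp)

-- total number of results
def pvT (pools : List (List String)) : Nat := (pools.map List.length).prod

lemma pvFoldl_mul (pools : List (List String)) (a : Nat) :
    pools.foldl (fun t c => t * c.length) a = a * pvT pools := by
  induction pools generalizing a with
  | nil => simp [pvT]
  | cons l ls ih => simp [List.foldl_cons, ih, pvT, Nat.mul_assoc]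

-- decoded gate list of index r (leftmost digit most significant)
def pvDec (pools : List (List String)) (r : Nat) : List String :=
  match pools with
  | [] => []
  | l :: ls => l.getD ((r / pvT ls) % l.length) "" :: pvDec ls r

lemma pvT_pos (pools : List (List String)) (h : ∀ c ∈ pools, 0 < c.length) :
    0 < pvT pools := by
  unfold pvT
  exact List.prod_pos (by simpa using h)

-- the inner divmod loop computes pvDec
lemma pvFold_dec (pools : List (List String)) (r : Nat) (acc : List String) :
    pools.reverse.foldl
      (fun (st : Nat × List String) c =>
        (st.1 / c.length, c.getD (st.1 % c.length) "" :: st.2))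
      (r, acc)
    = (r / pvT pools, pvDec pools r ++ acc) := by
  induction pools generalizing acc with
  | nil => simp [pvT, pvDec]
  | cons l ls ih =>
    simp only [List.reverse_cons, List.foldl_append, ih, List.foldl_cons, List.foldl_nil]
    simp [pvDec, pvT, Nat.div_div_eq_div_mul, Nat.mul_comm]

lemma pvDec_mod (pools : List (List String)) :
    (∀ c ∈ pools, 0 < c.length) →
    ∀ a s : Nat, pvDec pools (a * pvT pools + s) = pvDec pools s := by
  induction pools with
  | nil => intro _ a s; rfl
  | cons l ls ih =>
    intro h a s
    have hT : 0 < pvT ls := pvT_pos ls (fun c hc => h c (List.mem_cons_of_mem _ hc))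
    have harith : a * pvT (l :: ls) + s = s + a * l.length * pvT ls := by
      simp [pvT]; ring
    simp only [pvDec, harith]
    have hdiv : (s + a * l.length * pvT ls) / pvT ls = s / pvT ls + a * l.length :=
      Nat.add_mul_div_right s (a * l.length) hT
    have hmod : (s / pvT ls + a * l.length) % l.length = (s / pvT ls) % l.length :=
      Nat.add_mul_mod_self_right _ _ _
    rw [hdiv, hmod]
    have htail : pvDec ls (s + a * l.length * pvT ls) = pvDec ls s := by
      have h2 : s + a * l.length * pvT ls = (a * l.length) * pvT ls + s := by ring
      rw [h2]; exact ih (fun c hc => h c (List.mem_cons_of_mem _ hc)) (a * l.length) s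
    rw [htail]

lemma pvRange_mul (a b : Nat) :
    List.range (a * b)
    = (List.range a).flatMap (fun q => (List.range b).map (fun s => q * b + s)) := by
  induction a with
  | zero => simp
  | succ a ih =>
    have : (a + 1) * b = a * b + b := by ring
    rw [this, List.range_add, List.range_succ, List.flatMap_append, ← ih]
    simp [List.flatMap_cons]

lemma pvGetD_enum (l : List String) :
    (List.range l.length).map (fun q => l.getD q "") = l := by
  induction l with
  | nil => simp
  | cons x t ih =>
    rw [List.length_cons, List.range_succ_eq_map]
    simp only [List.map_cons, List.map_map]
    refine congrArg (x :: ·) ?_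
    simpa [Function.comp] using ih

lemma pvProduct_eq (pools : List (List String)) (h : ∀ c ∈ pools, 0 < c.length) :
    pvProduct pools = (List.range (pvT pools)).map (pvDec pools) := by
  induction pools with
  | nil => simp [pvProduct, pvT, pvDec]
  | cons l ls ih =>
    have hT : 0 < pvT ls := pvT_pos ls (fun c hc => h c (List.mem_cons_of_mem _ hc))
    have hls := ih (fun c hc => h c (List.mem_cons_of_mem _ hc))
    have hTc : pvT (l :: ls) = l.length * pvT ls := by simp [pvT]
    rw [hTc, pvRange_mul, List.map_flatMap]
    -- left side: enumerate l by index
    have hl : pvProduct (l :: ls)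
        = (List.range l.length).flatMap
            (fun q => (pvProduct ls).map (fun s => l.getD q "" :: s)) := by
      show l.flatMap _ = _
      conv_lhs => rw [← pvGetD_enum l]
      rw [List.flatMap_map]
    rw [hl]
    refine List.flatMap_congr (fun q hq => ?_)
    have hq' : q < l.length := List.mem_range.mp hq
    rw [List.map_map, hls, List.map_map]
    refine List.map_congr_left (fun s hs => ?_)
    have hs' : s < pvT ls := List.mem_range.mp hs
    simp only [Function.comp_apply]
    show l.getD q "" :: pvDec ls s = pvDec (l :: ls) (q * pvT ls + s)
    have hdiv : (q * pvT ls + s) / pvT ls = q := by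
      have h2 : q * pvT ls + s = pvT ls * q + s := by ring
      rw [h2, Nat.mul_add_div hT, Nat.div_eq_of_lt hs', Nat.add_zero]
    have hdm : pvDec ls (q * pvT ls + s) = pvDec ls s :=
      pvDec_mod ls (fun c hc => h c (List.mem_cons_of_mem _ hc)) q s
    simp only [pvDec, hdiv, Nat.mod_eq_of_lt hq', hdm]

lemma pvChoices_pos (p : Char) : 0 < (pvChoices p).length := by
  unfold pvChoices pvAllGates
  split <;> simp

-- ===== VERDICT (by name: the statement is the Claim_ definition above) =====
theorem get_commuting_strings_py_spec : Claim_equal_get_commuting_strings_py := by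
  intro s _
  unfold Spec_get_commuting_strings_py get_commuting_strings_py get_commuting_strings_py_alt
  rw [pvBuildBasis_eq]
  set pools := s.toList.map pvChoices with hp
  have hpos : ∀ c ∈ pools, 0 < c.length := by
    intro c hc
    rcases List.mem_map.mp hc with ⟨p, _, rfl⟩
    exact pvChoices_pos p
  rw [pvProduct_eq pools hpos, List.map_map]
  simp only [pvFoldl_mul, Nat.one_mul]
  refine List.map_congr_left (fun i _ => ?_)
  simp only [Function.comp_apply, pvFold_dec]
  simp
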